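-- pv_equiv track=rewrite | github.com/valexeichik/Algorithms | graph_algs/DFS.py | dfs
-- ===== SOURCE A (Python) =====
-- def dfs(matrix, n):
--     is_visited = [False] * n
--     labels = [-1] * n
--     queue = []
--     label = 1
--     for i in range(n):
--         if not is_visited[i]:
--             queue.append(i)
--             while queue:
--                 current_node = queue.pop()
--                 if not is_visited[current_node]:
--                     is_visited[current_node] = True
--                     labels[current_node] = label
--                     label += 1
--                     for j in range(n - 1, -1, -1):
--                         if matrix[current_node][j] == 1 and not is_visited[j]:
--                             queue.append(j)
--     return labels
-- ===== SOURCE B (Python) =====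
-- def dfs(matrix, n):
--     is_visited = [False] * n
--     labels = [-1] * n
--     label = 1
--
--     def visit(u):
--         nonlocal label
--         is_visited[u] = True
--         labels[u] = label
--         label += 1
--         for j in range(n):
--             if matrix[u][j] == 1 and not is_visited[j]:
--                 visit(j)
--
--     for i in range(n):
--         if not is_visited[i]:
--             visit(i)
--     return labels
-- ===== Notes on version B (the rewrite author's own statement) =====
-- stated objective: alternative
-- what changed: Replaces A's explicit stack with duplicate entries, pop-time visited re-checks and a reverse neighbour scan by recursive DFS: a nested visit(u) marks and labels u on entry and recurses over neighbours in forward order, so no node is ever queued twice.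
import Mathlib
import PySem

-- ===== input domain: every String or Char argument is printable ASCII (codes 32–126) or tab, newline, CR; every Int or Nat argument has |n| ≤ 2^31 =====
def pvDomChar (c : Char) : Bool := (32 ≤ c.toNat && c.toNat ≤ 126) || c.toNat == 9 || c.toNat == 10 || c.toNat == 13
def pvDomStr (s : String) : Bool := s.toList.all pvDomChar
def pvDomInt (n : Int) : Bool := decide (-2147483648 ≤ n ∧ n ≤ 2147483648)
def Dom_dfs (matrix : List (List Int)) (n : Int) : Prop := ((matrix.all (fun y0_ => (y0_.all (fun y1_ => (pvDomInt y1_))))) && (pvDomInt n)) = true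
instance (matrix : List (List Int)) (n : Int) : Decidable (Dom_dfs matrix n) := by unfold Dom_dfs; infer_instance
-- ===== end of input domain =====

-- B replaces A's explicit stack (with duplicate entries and a reverse neighbour scan) by
-- recursive DFS with a forward neighbour scan; same labels, no duplicate stack entries.

-- ===== PORT A =====
-- inner 'for j in range(n-1, -1, -1): if matrix[current][j] == 1 and not is_visited[j]: queue.append(j)'
-- (stack top = list head here, so 'append' is cons)
def aPush (matrix : List (List Int)) (n u : Int) (vis : List Bool) (q : List Int) : List Int :=
  (PySem.List.pyRange (n - 1) (-1) (-1)).foldl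
    (fun q j =>
      if (PySem.List.pyGetD (PySem.List.pyGetD matrix u []) j 0 == 1)
          && !(PySem.List.pyGetD vis j false) then j :: q else q) q

-- helper for the termination measure of the while loop
theorem count_false_set_true : ∀ (l : List Bool) (k : Nat), k < l.length →
    l.getD k false = false → (l.set k true).count false + 1 = l.count false := by
  intro l
  induction l with
  | nil => intro k h; simp at h
  | cons a t ih =>
    intro k hk hf
    cases k with
    | zero => simp at hf; simp [hf]
    | succ k =>
      simp at hk hf
      have := ih k hk hf
      simp [List.count_cons]
      omega

-- the 'while queue:' loop of A; state = (is_visited, labels, label)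
theorem aPush_length_le (matrix : List (List Int)) (n u : Int) (vis : List Bool)
    (q : List Int) : (aPush matrix n u vis q).length ≤ n.toNat + q.length := by
  have key : ∀ (l : List Int) (q0 : List Int),
      (l.foldl (fun q j =>
        if (PySem.List.pyGetD (PySem.List.pyGetD matrix u []) j 0 == 1)
            && !(PySem.List.pyGetD vis j false) then j :: q else q) q0).length
        ≤ l.length + q0.length := by
    intro l
    induction l with
    | nil => intro q0; simp
    | cons a t ih =>
      intro q0
      simp only [List.foldl_cons]
      split
      · calc _ ≤ t.length + (a :: q0).length := ih _
          _ ≤ _ := by simp only [List.length_cons]; omega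
      · calc _ ≤ t.length + q0.length := ih _
          _ ≤ _ := by simp only [List.length_cons]; omega
  have h2 := key (PySem.List.pyRange (n - 1) (-1) (-1)) q
  have h3 : (PySem.List.pyRange (n - 1) (-1) (-1)).length = n.toNat := by
    rw [PySem.List.length_pyRange_neg_one]; omega
  unfold aPush
  omega

def aLoop (matrix : List (List Int)) (n : Int) (q : List Int) (vis : List Bool)
    (labs : List Int) (lab : Int) : List Bool × List Int × Int :=
  match q with
  | [] => (vis, labs, lab)
  | u :: rest =>
    -- totality guard only: reachable queue entries always lie in [0, n) = range of is_visited
    if hu : 0 ≤ u ∧ u.toNat < vis.length then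
      if hv : PySem.List.pyGetD vis u false then aLoop matrix n rest vis labs lab
      else
        aLoop matrix n (aPush matrix n u (PySem.List.pySetD vis u true) rest)
          (PySem.List.pySetD vis u true) (PySem.List.pySetD labs u lab) (lab + 1)
    else aLoop matrix n rest vis labs lab
  termination_by (n.toNat + 2) * vis.count false + q.length
  decreasing_by
  · simp only [List.length_cons]; omega
  · have hset : PySem.List.pySetD vis u true = vis.set u.toNat true :=
      PySem.List.pySetD_of_nonneg vis true hu.1
    have hget : vis.getD u.toNat false = false := by
      rw [PySem.List.pyGetD_of_nonneg vis false hu.1] at hv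
      simpa using hv
    have hcnt := count_false_set_true vis u.toNat hu.2 hget
    rw [← hset] at hcnt
    have hmul : (n.toNat + 2) * (List.count false vis)
        = (n.toNat + 2) * (List.count false (PySem.List.pySetD vis u true)) + (n.toNat + 2) := by
      rw [← hcnt]; ring
    have hlen := aPush_length_le matrix n u (PySem.List.pySetD vis u true) rest
    simp only [List.length_cons]
    omega
  · simp only [List.length_cons]; omega

def dfs (matrix : List (List Int)) (n : Int) : List Int :=
  let st := (PySem.List.pyRange 0 n 1).foldl
    (fun st i =>
      if !(PySem.List.pyGetD st.1 i false) then aLoop matrix n [i] st.1 st.2.1 st.2.2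
      else st)
    (List.replicate n.toNat false, List.replicate n.toNat (-1), 1)
  st.2.1

-- ===== PORT B =====
-- recursive 'visit(u)'; the fuel argument is a totality guard only (the recursion depth is
-- bounded by the number of still-unvisited nodes, which the initial fuel n.toNat dominates)
def bVisit (matrix : List (List Int)) (n : Int) :
    Nat → Int → List Bool → List Int → Int → List Bool × List Int × Int
  | 0, _, vis, labs, lab => (vis, labs, lab)
  | fuel + 1, u, vis, labs, lab =>
    (PySem.List.pyRange 0 n 1).foldl
      (fun st j =>
        if (PySem.List.pyGetD (PySem.List.pyGetD matrix u []) j 0 == 1)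
            && !(PySem.List.pyGetD st.1 j false) then
          bVisit matrix n fuel j st.1 st.2.1 st.2.2
        else st)
      (PySem.List.pySetD vis u true, PySem.List.pySetD labs u lab, lab + 1)

def dfs_alt (matrix : List (List Int)) (n : Int) : List Int :=
  let st := (PySem.List.pyRange 0 n 1).foldl
    (fun st i =>
      if !(PySem.List.pyGetD st.1 i false) then bVisit matrix n n.toNat i st.1 st.2.1 st.2.2
      else st)
    (List.replicate n.toNat false, List.replicate n.toNat (-1), 1)
  st.2.1

-- ===== PRECONDITION & SPEC =====
-- Pre_: exactly the inputs where Python A returns (every node of range(n) is visited once and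
-- its full matrix row read, so A raises IndexError iff some of the first n rows is shorter
-- than n or matrix has fewer than n rows)
def Pre_dfs (matrix : List (List Int)) (n : Int) : Prop :=
  n ≤ (matrix.length : Int) ∧ ∀ row ∈ matrix.take n.toNat, n ≤ (row.length : Int)
instance (matrix : List (List Int)) (n : Int) : Decidable (Pre_dfs matrix n) := by
  unfold Pre_dfs; infer_instance
def pvWitness_dfs : List (List Int) × Int := ([[0, 1], [1, 0]], 2)

def Spec_dfs (matrix : List (List Int)) (n : Int) (out : List Int) : Prop := out = dfs_alt matrix n
instance (matrix : List (List Int)) (n : Int) (out : List Int) : Decidable (Spec_dfs matrix n out) := by unfold Spec_dfs; infer_instance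

-- ===== CLAIM (what is proved, stated in full; the proofs are below) =====
def Claim_equal_dfs : Prop := ∀ (matrix : List (List Int)) (n : Int), Dom_dfs matrix n → Pre_dfs matrix n → Spec_dfs matrix n (dfs matrix n)

-- ===== LEMMAS AND PROOFS =====

-- generic list-of-Bool lemmas -------------------------------------------------

theorem getD_set_true (l : List Bool) (i k : Nat) (h : l.getD k false = true) :
    (l.set i true).getD k false = true := by
  have hk : k < l.length := by
    by_contra hk
    rw [List.getD_eq_default] at h
    · exact Bool.false_ne_true h
    · omega
  rw [List.getD_eq_getElem _ _ (by simpa using hk)]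
  rw [List.getElem_set]
  split
  · rfl
  · rw [List.getD_eq_getElem _ _ hk] at h
    exact h

theorem count_false_le_of_mono : ∀ (l l' : List Bool), l'.length = l.length →
    (∀ k, l.getD k false = true → l'.getD k false = true) →
    l'.count false ≤ l.count false := by
  intro l
  induction l with
  | nil =>
    intro l' hlen _
    have : l' = [] := List.eq_nil_of_length_eq_zero (by simpa using hlen)
    simp [this]
  | cons a t ih =>
    intro l' hlen hmono
    cases l' with
    | nil => simp
    | cons b t' =>
      have htail : t'.count false ≤ t.count false := by
        apply ih t' (by simpa using hlen)
        intro k hk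
        have := hmono (k + 1) (by simpa using hk)
        simpa using this
      have hhead : a = true → b = true := by
        intro ha
        have := hmono 0 (by simpa using ha)
        simpa using this
      cases a <;> cases b
      · simpa [List.count_cons] using htail
      · simpa [List.count_cons] using Nat.le_succ_of_le htail
      · exact absurd (hhead rfl) (by simp)
      · simpa [List.count_cons] using htail

theorem count_false_pos (l : List Bool) (k : Nat) (hk : k < l.length)
    (h : l.getD k false = false) : 1 ≤ l.count false := by
  have := count_false_set_true l k hk h
  omega

-- the shared shape of B's inner loop body -------------------------------------

def bStep (matrix : List (List Int)) (n : Int) (f : Nat) (e : Int → Bool)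
    (st : List Bool × List Int × Int) (j : Int) : List Bool × List Int × Int :=
  if e j && !(PySem.List.pyGetD st.1 j false) then
    bVisit matrix n f j st.1 st.2.1 st.2.2
  else st

theorem bVisit_succ (matrix : List (List Int)) (n : Int) (f : Nat) (u : Int)
    (vis : List Bool) (labs : List Int) (lab : Int) :
    bVisit matrix n (f + 1) u vis labs lab
      = (PySem.List.pyRange 0 n 1).foldl
          (bStep matrix n f (fun j => PySem.List.pyGetD (PySem.List.pyGetD matrix u []) j 0 == 1))
          (PySem.List.pySetD vis u true, PySem.List.pySetD labs u lab, lab + 1) := rfl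

-- bVisit preserves the length of is_visited
theorem bVisit_length (matrix : List (List Int)) (n : Int) :
    ∀ (f : Nat) (u : Int) (vis : List Bool) (labs : List Int) (lab : Int),
      (bVisit matrix n f u vis labs lab).1.length = vis.length := by
  intro f
  induction f with
  | zero => intro u vis labs lab; rfl
  | succ f ih =>
    have Q : ∀ (e : Int → Bool) (l : List Int) (st : List Bool × List Int × Int),
        ((l.foldl (bStep matrix n f e) st).1.length = st.1.length) := by
      intro e l
      induction l with
      | nil => intro st; rfl
      | cons a t iht =>
        intro st
        simp only [List.foldl_cons]
        rw [iht]
        unfold bStep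
        split
        · exact ih a st.1 st.2.1 st.2.2
        · rfl
    intro u vis labs lab
    rw [bVisit_succ, Q]
    simp [PySem.List.length_pySetD]

-- bVisit only ever turns entries of is_visited to true
theorem bVisit_mono (matrix : List (List Int)) (n : Int) :
    ∀ (f : Nat) (u : Int), 0 ≤ u → ∀ (vis : List Bool) (labs : List Int) (lab : Int) (k : Nat),
      vis.getD k false = true → (bVisit matrix n f u vis labs lab).1.getD k false = true := by
  intro f
  induction f with
  | zero => intro u _ vis labs lab k h; exact h
  | succ f ih =>
    have Q : ∀ (e : Int → Bool) (l : List Int), (∀ j ∈ l, 0 ≤ j) →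
        ∀ (st : List Bool × List Int × Int) (k : Nat), st.1.getD k false = true →
          ((l.foldl (bStep matrix n f e) st).1.getD k false = true) := by
      intro e l
      induction l with
      | nil => intro _ st k h; exact h
      | cons a t iht =>
        intro hmem st k h
        simp only [List.foldl_cons]
        apply iht (fun j hj => hmem j (List.mem_cons_of_mem a hj))
        unfold bStep
        split
        · exact ih a (hmem a (List.mem_cons_self)) st.1 st.2.1 st.2.2 k h
        · exact h
    intro u hu vis labs lab k h
    rw [bVisit_succ]
    apply Q
    · intro j hj
      exact (PySem.List.mem_pyRange_one.mp hj).1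
    · rw [PySem.List.pySetD_of_nonneg vis true hu]
      exact getD_set_true vis u.toNat k h

-- hence the number of unvisited entries never grows
theorem bVisit_count (matrix : List (List Int)) (n : Int) (f : Nat) (u : Int) (hu : 0 ≤ u)
    (vis : List Bool) (labs : List Int) (lab : Int) :
    (bVisit matrix n f u vis labs lab).1.count false ≤ vis.count false := by
  apply count_false_le_of_mono
  · exact bVisit_length matrix n f u vis labs lab
  · exact fun k hk => bVisit_mono matrix n f u hu vis labs lab k hk

-- with enough fuel on both sides, the fuel does not matter
theorem bFuel (matrix : List (List Int)) (n : Int) :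
    ∀ (c : Nat) (e : Int → Bool) (l : List Int) (f g : Nat) (st : List Bool × List Int × Int),
      st.1.length = n.toNat → (∀ j ∈ l, 0 ≤ j ∧ j < n) →
      st.1.count false ≤ c → c ≤ f → c ≤ g →
      l.foldl (bStep matrix n f e) st = l.foldl (bStep matrix n g e) st := by
  intro c
  induction c with
  | zero =>
    intro e l
    induction l with
    | nil => intro f g st _ _ _ _ _; rfl
    | cons a t iht =>
      intro f g st hlen hmem hcf hf hg
      have hskip : ∀ (f' : Nat), bStep matrix n f' e st a = st := by
        intro f'
        unfold bStep
        split
        · rename_i hcond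
          exfalso
          have ha := hmem a List.mem_cons_self
          have h1 : PySem.List.pyGetD st.1 a false = false := by
            simp only [Bool.and_eq_true, Bool.not_eq_true'] at hcond
            exact hcond.2
          rw [PySem.List.pyGetD_of_nonneg st.1 false ha.1] at h1
          have hka : a.toNat < st.1.length := by omega
          have := count_false_pos st.1 a.toNat hka h1
          omega
        · rfl
      simp only [List.foldl_cons, hskip]
      exact iht f g st hlen (fun j hj => hmem j (List.mem_cons_of_mem a hj)) hcf hf hg
  | succ c ihc =>
    intro e l
    induction l with
    | nil => intro f g st _ _ _ _ _; rfl
    | cons a t iht =>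
      intro f g st hlen hmem hcf hf hg
      have ha := hmem a List.mem_cons_self
      have hmem' : ∀ j ∈ t, 0 ≤ j ∧ j < n := fun j hj => hmem j (List.mem_cons_of_mem a hj)
      simp only [List.foldl_cons]
      by_cases hcond : (e a && !(PySem.List.pyGetD st.1 a false)) = true
      · -- a is an unvisited neighbour: one recursive visit on each side
        obtain ⟨f', rfl⟩ : ∃ f', f = f' + 1 := ⟨f - 1, by omega⟩
        obtain ⟨g', rfl⟩ : ∃ g', g = g' + 1 := ⟨g - 1, by omega⟩
        have hva : PySem.List.pyGetD st.1 a false = false := by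
          have hcond' := hcond
          simp only [Bool.and_eq_true, Bool.not_eq_true'] at hcond'
          exact hcond'.2
        rw [PySem.List.pyGetD_of_nonneg st.1 false ha.1] at hva
        have hka : a.toNat < st.1.length := by omega
        have hcnt := count_false_set_true st.1 a.toNat hka hva
        have hval : bVisit matrix n (f' + 1) a st.1 st.2.1 st.2.2
            = bVisit matrix n (g' + 1) a st.1 st.2.1 st.2.2 := by
          rw [bVisit_succ, bVisit_succ]
          apply ihc
          · show (PySem.List.pySetD st.1 a true).length = n.toNat
            rw [PySem.List.length_pySetD]
            exact hlen
          · intro j hj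
            exact ⟨(PySem.List.mem_pyRange_one.mp hj).1, (PySem.List.mem_pyRange_one.mp hj).2⟩
          · show List.count false (PySem.List.pySetD st.1 a true) ≤ c
            rw [PySem.List.pySetD_of_nonneg st.1 true ha.1]
            omega
          · omega
          · omega
        have hstepf : bStep matrix n (f' + 1) e st a
            = bVisit matrix n (g' + 1) a st.1 st.2.1 st.2.2 := by
          unfold bStep
          rw [if_pos hcond, hval]
        have hstepg : bStep matrix n (g' + 1) e st a
            = bVisit matrix n (g' + 1) a st.1 st.2.1 st.2.2 := by
          unfold bStep
          rw [if_pos hcond]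
        rw [hstepf, hstepg]
        apply iht
        · rw [bVisit_length]
          exact hlen
        · exact hmem'
        · calc (bVisit matrix n (g' + 1) a st.1 st.2.1 st.2.2).1.count false
              ≤ st.1.count false := bVisit_count matrix n (g' + 1) a ha.1 st.1 st.2.1 st.2.2
            _ ≤ c + 1 := hcf
        · omega
        · omega

      · have hstep : ∀ (f' : Nat), bStep matrix n f' e st a = st := by
          intro f'
          unfold bStep
          rw [if_neg hcond]
        rw [hstep, hstep]
        exact iht f g st hlen hmem' hcf hf hg

-- A's reverse-order conditional pushes, characterised as a forward filter -----

theorem foldl_cons_filter : ∀ (l : List Int) (p : Int → Bool) (q : List Int),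
    l.foldl (fun q j => if p j then j :: q else q) q = (l.reverse.filter p) ++ q := by
  intro l
  induction l with
  | nil => intro p q; simp
  | cons a t ih =>
    intro p q
    simp only [List.foldl_cons, List.reverse_cons, List.filter_append]
    rw [ih]
    by_cases hp : p a = true
    · simp [hp]
    · simp [hp]

theorem aPush_eq (matrix : List (List Int)) (n u : Int) (vis : List Bool) (q : List Int) :
    aPush matrix n u vis q
      = ((PySem.List.pyRange 0 n 1).filter
          (fun j => (PySem.List.pyGetD (PySem.List.pyGetD matrix u []) j 0 == 1)
            && !(PySem.List.pyGetD vis j false))) ++ q := by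
  unfold aPush
  rw [foldl_cons_filter]
  congr 1
  rw [PySem.List.pyRange_neg_one_eq_reverse]
  simp

-- B's outer step, folded over a worklist --------------------------------------

def visitList (matrix : List (List Int)) (n : Int) (q : List Int)
    (st : List Bool × List Int × Int) : List Bool × List Int × Int :=
  q.foldl
    (fun st u =>
      if PySem.List.pyGetD st.1 u false then st
      else bVisit matrix n n.toNat u st.1 st.2.1 st.2.2)
    st

theorem visitList_append (matrix : List (List Int)) (n : Int) (A B : List Int)
    (st : List Bool × List Int × Int) :
    visitList matrix n (A ++ B) st = visitList matrix n B (visitList matrix n A st) := by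
  unfold visitList
  rw [List.foldl_append]

theorem visitList_cons (matrix : List (List Int)) (n : Int) (u : Int) (q : List Int)
    (st : List Bool × List Int × Int) :
    visitList matrix n (u :: q) st
      = visitList matrix n q
          (if PySem.List.pyGetD st.1 u false then st
           else bVisit matrix n n.toNat u st.1 st.2.1 st.2.2) := by
  unfold visitList
  rw [List.foldl_cons]

-- popping A's pushes (re-checking visitedness at pop time) = B's forward scan
theorem filter_visit (matrix : List (List Int)) (n : Int) :
    ∀ (l : List Int) (vis0 : List Bool) (e : Int → Bool) (st : List Bool × List Int × Int),
      st.1.length = n.toNat → (∀ j ∈ l, 0 ≤ j ∧ j < n) →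
      (∀ k : Nat, vis0.getD k false = true → st.1.getD k false = true) →
      visitList matrix n (l.filter (fun j => e j && !(PySem.List.pyGetD vis0 j false))) st
        = l.foldl (bStep matrix n n.toNat e) st := by
  intro l
  induction l with
  | nil => intro vis0 e st _ _ _; rfl
  | cons a t ih =>
    intro vis0 e st hlen hmem hmono
    have ha := hmem a List.mem_cons_self
    have hmem' : ∀ j ∈ t, 0 ≤ j ∧ j < n := fun j hj => hmem j (List.mem_cons_of_mem a hj)
    simp only [List.foldl_cons, List.filter_cons]
    by_cases hea : e a = true
    · by_cases hva : PySem.List.pyGetD vis0 a false = true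
      · -- already visited when pushed: A never pushed it, B skips it now
        have hsa : PySem.List.pyGetD st.1 a false = true := by
          rw [PySem.List.pyGetD_of_nonneg vis0 false ha.1] at hva
          rw [PySem.List.pyGetD_of_nonneg st.1 false ha.1]
          exact hmono a.toNat hva
        have hc : (e a && !(PySem.List.pyGetD vis0 a false)) = false := by
          simp [hva]
        have hc' : (e a && !(PySem.List.pyGetD st.1 a false)) = false := by
          simp [hsa]
        rw [hc]
        simp only [Bool.false_eq_true, if_false]
        unfold bStep
        rw [if_neg (by simp [hc'])]
        exact ih vis0 e st hlen hmem' hmono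
      · have hc : (e a && !(PySem.List.pyGetD vis0 a false)) = true := by
          simp [hea, Bool.eq_false_iff.mpr hva]
        rw [hc]
        simp only [if_true]
        unfold visitList
        simp only [List.foldl_cons]
        by_cases hsa : PySem.List.pyGetD st.1 a false = true
        · -- visited meanwhile (during an earlier recursive visit): both skip
          rw [if_pos hsa]
          unfold bStep
          rw [if_neg (by simp [hsa])]
          exact ih vis0 e st hlen hmem' hmono
        · rw [if_neg hsa]
          have hstep : bStep matrix n n.toNat e st a
              = bVisit matrix n n.toNat a st.1 st.2.1 st.2.2 := by
            unfold bStep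
            rw [if_pos (by simp [hea, Bool.eq_false_iff.mpr hsa])]
          rw [hstep]
          apply ih vis0 e
          · rw [bVisit_length]
            exact hlen
          · exact hmem'
          · intro k hk
            exact bVisit_mono matrix n n.toNat a ha.1 st.1 st.2.1 st.2.2 k (hmono k hk)
    · have hc : (e a && !(PySem.List.pyGetD vis0 a false)) = false := by
        simp [Bool.eq_false_iff.mpr hea]
      rw [hc]
      simp only [Bool.false_eq_true, if_false]
      unfold bStep
      rw [if_neg (by simp [Bool.eq_false_iff.mpr hea])]
      exact ih vis0 e st hlen hmem' hmono

theorem aLoop_nil (matrix : List (List Int)) (n : Int) (vis : List Bool)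
    (labs : List Int) (lab : Int) : aLoop matrix n [] vis labs lab = (vis, labs, lab) := by
  unfold aLoop
  rfl

-- main simulation: A's while loop on any reachable queue = B's visits, in order
theorem aLoop_eq_visitList (matrix : List (List Int)) (n : Int) :
    ∀ (m : Nat) (q : List Int) (vis : List Bool) (labs : List Int) (lab : Int),
      (n.toNat + 2) * vis.count false + q.length ≤ m →
      vis.length = n.toNat → (∀ u ∈ q, 0 ≤ u ∧ u < n) →
      aLoop matrix n q vis labs lab = visitList matrix n q (vis, labs, lab) := by
  intro m
  induction m with
  | zero =>
    intro q vis labs lab hm _ _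
    have : q = [] := List.eq_nil_of_length_eq_zero (by omega)
    subst this
    rw [aLoop_nil]
    rfl
  | succ m ih =>
    intro q vis labs lab hm hlen hq
    match q with
    | [] => rw [aLoop_nil]; rfl
    | u :: rest =>
      have hu := hq u List.mem_cons_self
      have hrest : ∀ j ∈ rest, 0 ≤ j ∧ j < n := fun j hj => hq j (List.mem_cons_of_mem u hj)
      have hguard : 0 ≤ u ∧ u.toNat < vis.length := ⟨hu.1, by omega⟩
      unfold aLoop
      rw [dif_pos hguard]
      by_cases hv : PySem.List.pyGetD vis u false = true
      · rw [dif_pos hv]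
        rw [ih rest vis labs lab (by simp at hm ⊢; omega) hlen hrest]
        rw [visitList_cons]
        show visitList matrix n rest (vis, labs, lab)
          = visitList matrix n rest
              (if PySem.List.pyGetD vis u false = true then (vis, labs, lab)
               else bVisit matrix n n.toNat u vis labs lab)
        rw [if_pos hv]
      · rw [dif_neg hv]
        have hva : vis.getD u.toNat false = false := by
          rw [PySem.List.pyGetD_of_nonneg vis false hu.1] at hv
          simpa using hv
        have hcnt := count_false_set_true vis u.toNat hguard.2 hva
        have hn1 : 1 ≤ n.toNat := by omega
        have hcv : vis.count false ≤ n.toNat := by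
          rw [← hlen]
          exact List.count_le_length
        -- the visited/labels state right after marking u
        rw [aPush_eq]
        have hfl : ∀ j ∈ ((PySem.List.pyRange 0 n 1).filter
            (fun j => (PySem.List.pyGetD (PySem.List.pyGetD matrix u []) j 0 == 1)
              && !(PySem.List.pyGetD (PySem.List.pySetD vis u true) j false))), 0 ≤ j ∧ j < n := by
          intro j hj
          have := List.mem_filter.mp hj
          exact ⟨(PySem.List.mem_pyRange_one.mp this.1).1, (PySem.List.mem_pyRange_one.mp this.1).2⟩
        have hlen' : (PySem.List.pySetD vis u true).length = n.toNat := by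
          rw [PySem.List.length_pySetD]; exact hlen
        have hcnt' : (PySem.List.pySetD vis u true).count false + 1 = vis.count false := by
          rw [PySem.List.pySetD_of_nonneg vis true hu.1]
          exact hcnt
        have hmQ : (n.toNat + 2) * (PySem.List.pySetD vis u true).count false
              + (((PySem.List.pyRange 0 n 1).filter
                  (fun j => (PySem.List.pyGetD (PySem.List.pyGetD matrix u []) j 0 == 1)
                    && !(PySem.List.pyGetD (PySem.List.pySetD vis u true) j false))) ++ rest).length
              ≤ m := by
          have hflen : (((PySem.List.pyRange 0 n 1).filter
              (fun j => (PySem.List.pyGetD (PySem.List.pyGetD matrix u []) j 0 == 1)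
                && !(PySem.List.pyGetD (PySem.List.pySetD vis u true) j false)))).length
              ≤ n.toNat := by
            calc _ ≤ (PySem.List.pyRange 0 n 1).length := List.length_filter_le _ _
              _ = n.toNat := by rw [PySem.List.length_pyRange_one]; omega
          have hmul : (n.toNat + 2) * vis.count false
              = (n.toNat + 2) * (PySem.List.pySetD vis u true).count false + (n.toNat + 2) := by
            rw [← hcnt']; ring
          simp only [List.length_append, List.length_cons] at hm ⊢
          omega
        rw [ih _ _ _ _ hmQ hlen' (fun j hj => (List.mem_append.mp hj).elim (hfl j) (hrest j))]
        -- split the worklist: first u's subtree (the filtered pushes), then the rest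
        have hkey : visitList matrix n
            ((PySem.List.pyRange 0 n 1).filter
              (fun j => (PySem.List.pyGetD (PySem.List.pyGetD matrix u []) j 0 == 1)
                && !(PySem.List.pyGetD (PySem.List.pySetD vis u true) j false)))
            (PySem.List.pySetD vis u true, PySem.List.pySetD labs u lab, lab + 1)
            = bVisit matrix n n.toNat u vis labs lab := by
          rw [filter_visit matrix n (PySem.List.pyRange 0 n 1) (PySem.List.pySetD vis u true)
              (fun j => PySem.List.pyGetD (PySem.List.pyGetD matrix u []) j 0 == 1)
              (PySem.List.pySetD vis u true, PySem.List.pySetD labs u lab, lab + 1)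
              hlen'
              (fun j hj => ⟨(PySem.List.mem_pyRange_one.mp hj).1, (PySem.List.mem_pyRange_one.mp hj).2⟩)
              (fun k hk => hk)]
          obtain ⟨f', hf'⟩ : ∃ f', n.toNat = f' + 1 := ⟨n.toNat - 1, by omega⟩
          conv_rhs => rw [hf', bVisit_succ]
          apply bFuel matrix n ((PySem.List.pySetD vis u true).count false)
          · show (PySem.List.pySetD vis u true).length = n.toNat
            exact hlen'
          · intro j hj
            exact ⟨(PySem.List.mem_pyRange_one.mp hj).1, (PySem.List.mem_pyRange_one.mp hj).2⟩
          · show List.count false (PySem.List.pySetD vis u true) ≤ (PySem.List.pySetD vis u true).count false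
            exact le_refl _
          · omega
          · omega
        rw [visitList_append, hkey, visitList_cons]
        show visitList matrix n rest (bVisit matrix n n.toNat u vis labs lab)
          = visitList matrix n rest
              (if PySem.List.pyGetD vis u false = true then (vis, labs, lab)
               else bVisit matrix n n.toNat u vis labs lab)
        rw [if_neg hv]

-- the two outer loops agree step by step --------------------------------------

theorem outer_eq (matrix : List (List Int)) (n : Int) :
    ∀ (l : List Int) (st : List Bool × List Int × Int),
      st.1.length = n.toNat → (∀ i ∈ l, 0 ≤ i ∧ i < n) →
      l.foldl (fun st i =>
          if !(PySem.List.pyGetD st.1 i false) then aLoop matrix n [i] st.1 st.2.1 st.2.2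
          else st) st
        = l.foldl (fun st i =>
            if !(PySem.List.pyGetD st.1 i false) then bVisit matrix n n.toNat i st.1 st.2.1 st.2.2
            else st) st := by
  intro l
  induction l with
  | nil => intro st _ _; rfl
  | cons a t ih =>
    intro st hlen hmem
    have ha := hmem a List.mem_cons_self
    have hmem' : ∀ i ∈ t, 0 ≤ i ∧ i < n := fun i hi => hmem i (List.mem_cons_of_mem a hi)
    simp only [List.foldl_cons]
    by_cases hva : PySem.List.pyGetD st.1 a false = true
    · rw [if_neg (by simp [hva]), if_neg (by simp [hva])]
      exact ih st hlen hmem'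
    · have hone : aLoop matrix n [a] st.1 st.2.1 st.2.2
          = bVisit matrix n n.toNat a st.1 st.2.1 st.2.2 := by
        rw [aLoop_eq_visitList matrix n ((n.toNat + 2) * st.1.count false + 1) [a] st.1 st.2.1 st.2.2
            (by simp) hlen (by intro u hu; simp at hu; subst hu; exact ha)]
        rw [visitList_cons]
        show visitList matrix n []
            (if PySem.List.pyGetD st.1 a false = true then (st.1, st.2.1, st.2.2)
             else bVisit matrix n n.toNat a st.1 st.2.1 st.2.2)
          = bVisit matrix n n.toNat a st.1 st.2.1 st.2.2
        rw [if_neg hva]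
        rfl
      rw [if_pos (by simp [Bool.eq_false_iff.mpr hva]), if_pos (by simp [Bool.eq_false_iff.mpr hva])]
      rw [hone]
      apply ih
      · rw [bVisit_length]
        exact hlen
      · exact hmem'

-- ===== VERDICT (by name: the statement is the Claim_ definition above) =====
theorem dfs_spec : Claim_equal_dfs := by
  unfold Claim_equal_dfs Spec_dfs
  intro matrix n _dom _pre
  unfold dfs dfs_alt
  rw [outer_eq matrix n (PySem.List.pyRange 0 n 1)
      (List.replicate n.toNat false, List.replicate n.toNat (-1), 1)
      (by simp)
      (fun i hi => ⟨(PySem.List.mem_pyRange_one.mp hi).1, (PySem.List.mem_pyRange_one.mp hi).2⟩)]
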